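-- pv_equiv track=rewrite | github.com/UtarshM/aiblogfinal | server/advanced_seo_writer.py | _add_jump_links
-- ===== SOURCE A (Python) =====
-- from typing import Dict, List
--
-- def _add_jump_links(content: str, headings: List[Dict]) -> str:
--     """Insert H2 headings into content at strategic points"""
--
--     # Split content into paragraphs
--     paragraphs = [p.strip() for p in content.split('\n\n') if p.strip()]
--
--     if len(paragraphs) < len(headings):
--         # Not enough paragraphs, just add headings at intervals
--         result = []
--         interval = max(1, len(paragraphs) // len(headings))
--
--         for i, para in enumerate(paragraphs):
--             # Add heading before paragraph at intervals
--             heading_index = i // interval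
--             if heading_index < len(headings) and i % interval == 0 and i > 0:
--                 heading = headings[heading_index]
--                 result.append(f'<h2 id="{heading["id"]}">{heading["text"]}</h2>')
--             result.append(f'<p>{para}</p>')
--
--         return '\n\n'.join(result)
--
--     # Insert headings at strategic points
--     result = []
--     heading_index = 0
--     paragraphs_per_section = len(paragraphs) // len(headings)
--
--     for i, para in enumerate(paragraphs):
--         # Add heading at the start of each section
--         if i > 0 and i % paragraphs_per_section == 0 and heading_index < len(headings):
--             heading = headings[heading_index]
--             result.append(f'<h2 id="{heading["id"]}">{heading["text"]}</h2>')
--             heading_index += 1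
--
--         result.append(f'<p>{para}</p>')
--
--     return '\n\n'.join(result)
-- ===== SOURCE B (Python) =====
-- from typing import Dict, List
--
-- def _add_jump_links(content: str, headings: List[Dict]) -> str:
--     """Insert H2 headings by emitting whole sections: each heading followed by its
--     paragraph slice, instead of testing every paragraph index."""
--     paragraphs = [p.strip() for p in content.split('\n\n') if p.strip()]
--     n, m = len(paragraphs), len(headings)
--
--     def h2(h):
--         return f'<h2 id="{h["id"]}">{h["text"]}</h2>'
--
--     def wrap(chunk):
--         return [f'<p>{p}</p>' for p in chunk]
--
--     if n < m:
--         # a heading lands before every paragraph after the first: pair them up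
--         parts = wrap(paragraphs[:1])
--         for h, p in zip(headings[1:], paragraphs[1:]):
--             parts.append(h2(h))
--             parts.append(f'<p>{p}</p>')
--         return '\n\n'.join(parts)
--
--     step = n // m
--     parts = wrap(paragraphs[:step])
--     for k, h in enumerate(headings):
--         start = (k + 1) * step
--         if start >= n:
--             break
--         end = (k + 2) * step if k + 1 < m else n
--         parts.append(h2(h))
--         parts.extend(wrap(paragraphs[start:end]))
--     return '\n\n'.join(parts)
-- ===== Notes on version B (the rewrite author's own statement) =====
-- stated objective: alternative
-- what changed: Instead of scanning every paragraph and testing its index for an insertion (A's two per-paragraph loops with modular arithmetic / a running heading_index), B emits whole sections: it pairs headings with paragraphs via zip when paragraphs are scarce, and otherwise iterates over the HEADINGS, slicing out each heading's block of paragraphs (paragraphs[start:end]) and appending heading+block in one go.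
import Mathlib
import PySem

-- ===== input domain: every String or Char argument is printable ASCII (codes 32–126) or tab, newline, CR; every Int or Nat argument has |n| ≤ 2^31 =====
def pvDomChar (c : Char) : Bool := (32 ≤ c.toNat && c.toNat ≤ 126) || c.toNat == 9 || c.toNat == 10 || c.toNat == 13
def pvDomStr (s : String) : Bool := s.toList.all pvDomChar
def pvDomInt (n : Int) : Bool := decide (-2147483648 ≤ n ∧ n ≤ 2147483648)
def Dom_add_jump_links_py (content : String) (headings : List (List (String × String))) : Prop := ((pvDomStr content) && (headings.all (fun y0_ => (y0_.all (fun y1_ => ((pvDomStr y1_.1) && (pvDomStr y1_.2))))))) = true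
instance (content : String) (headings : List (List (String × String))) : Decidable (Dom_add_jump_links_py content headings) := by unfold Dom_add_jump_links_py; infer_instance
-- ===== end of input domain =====

-- B replaces A's per-paragraph index scan (modular test at every paragraph) by a
-- section-wise construction: zip headings with paragraphs when paragraphs are scarce,
-- else iterate over the headings, slicing out each heading's block of paragraphs.

-- shared helpers: both Pythons split/strip/filter the content the same way and build
-- the very same <h2>/<p> fragments (identical f-strings), so the formatting is shared
def pvParas (content : String) : List String :=
  (((PySem.Str.split? content "\n\n").getD []).map PySem.Str.strip).filter (fun p => p ≠ "")

def pvH2 (h : List (String × String)) : String :=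
  "<h2 id=\"" ++ ((h.lookup "id").getD "") ++ "\">" ++ ((h.lookup "text").getD "") ++ "</h2>"

def pvP (p : String) : String := "<p>" ++ p ++ "</p>"

-- ===== PORT A =====
-- branch 1 loop: for i, para in enumerate(paragraphs): heading at i // interval
def pvLoopA1 (headings : List (List (String × String))) (m interval : Nat) :
    List String → Nat → List String → List String
  | [], _, res => res
  | p :: ps, i, res =>
    let res' := if i / interval < m ∧ i % interval = 0 ∧ 0 < i
      then res ++ [pvH2 (headings.getD (i / interval) [])] else res
    pvLoopA1 headings m interval ps (i + 1) (res' ++ [pvP p])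

-- branch 2 loop: running heading_index hi, advanced only on an actual insert
def pvLoopA2 (headings : List (List (String × String))) (pps : Nat) :
    List String → Nat → Nat → List String → List String
  | [], _, _, res => res
  | p :: ps, i, hi, res =>
    if 0 < i ∧ i % pps = 0 ∧ hi < headings.length then
      pvLoopA2 headings pps ps (i + 1) (hi + 1)
        (res ++ [pvH2 (headings.getD hi [])] ++ [pvP p])
    else
      pvLoopA2 headings pps ps (i + 1) hi (res ++ [pvP p])

def add_jump_links_py (content : String) (headings : List (List (String × String))) : String :=
  let paragraphs := pvParas content
  if paragraphs.length < headings.length then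
    PySem.Str.join "\n\n"
      (pvLoopA1 headings headings.length
        (max 1 (paragraphs.length / headings.length)) paragraphs 0 [])
  else
    PySem.Str.join "\n\n"
      (pvLoopA2 headings (paragraphs.length / headings.length) paragraphs 0 0 [])

-- ===== PORT B =====
-- wrap(chunk): [f'<p>{p}</p>' for p in chunk]
def pvWrap (chunk : List String) : List String := chunk.map pvP

-- branch n < m: for h, p in zip(headings[1:], paragraphs[1:]): heading then paragraph
def pvLoopB1 : List (List (String × String)) → List String → List String
  | h :: hs, p :: ps => pvH2 h :: pvP p :: pvLoopB1 hs ps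
  | _, _ => []

-- branch n ≥ m: for k, h in enumerate(headings): emit heading + its paragraph slice,
-- break as soon as start >= n
def pvLoopB2 (paragraphs : List String) (n step m : Nat) :
    List (List (String × String)) → Nat → List String
  | [], _ => []
  | h :: hs, k =>
    let start := (k + 1) * step
    if n ≤ start then []
    else
      let stop := if k + 1 < m then (k + 2) * step else n
      (pvH2 h :: pvWrap (PySem.List.slice paragraphs (some ((start : Nat) : Int)) (some ((stop : Nat) : Int))))
        ++ pvLoopB2 paragraphs n step m hs (k + 1)

def add_jump_links_py_alt (content : String) (headings : List (List (String × String))) : String :=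
  let paragraphs := pvParas content
  let n := paragraphs.length
  let m := headings.length
  if n < m then
    PySem.Str.join "\n\n"
      (pvWrap (PySem.List.slice paragraphs none (some 1)) ++
        pvLoopB1 (PySem.List.slice headings (some 1) none) (PySem.List.slice paragraphs (some 1) none))
  else
    let step := n / m
    PySem.Str.join "\n\n"
      (pvWrap (PySem.List.slice paragraphs none (some ((step : Nat) : Int))) ++
        pvLoopB2 paragraphs n step m headings 0)

-- ===== PRECONDITION & SPEC =====
def pvHasKeys (h : List (String × String)) : Prop :=
  (h.lookup "id").isSome = true ∧ (h.lookup "text").isSome = true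

-- Pre_ excludes exactly the inputs on which the Python A raises: an empty headings list
-- (ZeroDivisionError in branch 2) and inputs where an actually inserted heading dict is
-- missing the "id" or "text" key (KeyError); headings never inserted may lack keys.
def Pre_add_jump_links_py (content : String) (headings : List (List (String × String))) : Prop :=
  headings ≠ [] ∧
  (if (pvParas content).length < headings.length then
    ∀ j, j < (pvParas content).length → 1 ≤ j → pvHasKeys (headings.getD j [])
  else
    ∀ k, k < min headings.length
        (((pvParas content).length - 1) / ((pvParas content).length / headings.length)) →
      pvHasKeys (headings.getD k []))

instance (content : String) (headings : List (List (String × String))) :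
    Decidable (Pre_add_jump_links_py content headings) := by
  unfold Pre_add_jump_links_py pvHasKeys; infer_instance

def pvWitness_add_jump_links_py : String × (List (List (String × String))) :=
  ("a\n\nb\n\nc\n\nd", [[("id", "s1"), ("text", "One")], [("id", "s2"), ("text", "Two")]])

def Spec_add_jump_links_py (content : String) (headings : List (List (String × String))) (out : String) : Prop := out = add_jump_links_py_alt content headings
instance (content : String) (headings : List (List (String × String))) (out : String) : Decidable (Spec_add_jump_links_py content headings out) := by unfold Spec_add_jump_links_py; infer_instance

-- ===== CLAIM (what is proved, stated in full; the proofs are below) =====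
def Claim_equal_add_jump_links_py : Prop := ∀ (content : String) (headings : List (List (String × String))), Dom_add_jump_links_py content headings → Pre_add_jump_links_py content headings → Spec_add_jump_links_py content headings (add_jump_links_py content headings)

-- ===== LEMMAS AND PROOFS =====

lemma pvLoopA1_acc (H : List (List (String × String))) (m ivl : Nat) :
    ∀ ps i res, pvLoopA1 H m ivl ps i res = res ++ pvLoopA1 H m ivl ps i [] := by
  intro ps
  induction ps with
  | nil => intro i res; simp [pvLoopA1]
  | cons p ps ih =>
    intro i res
    rw [pvLoopA1, pvLoopA1]
    split_ifs with hc
    · rw [ih (i + 1) ((res ++ [pvH2 (H.getD (i / ivl) [])]) ++ [pvP p]),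
        ih (i + 1) (([] ++ [pvH2 (H.getD (i / ivl) [])]) ++ [pvP p])]
      simp
    · rw [ih (i + 1) (res ++ [pvP p]), ih (i + 1) ([] ++ [pvP p])]
      simp

lemma pvLoopA2_acc (H : List (List (String × String))) (step : Nat) :
    ∀ ps i hi res, pvLoopA2 H step ps i hi res = res ++ pvLoopA2 H step ps i hi [] := by
  intro ps
  induction ps with
  | nil => intro i hi res; simp [pvLoopA2]
  | cons p ps ih =>
    intro i hi res
    rw [pvLoopA2, pvLoopA2]
    split_ifs with hc
    · rw [ih (i + 1) (hi + 1) (res ++ [pvH2 (H.getD hi [])] ++ [pvP p]),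
        ih (i + 1) (hi + 1) ([] ++ [pvH2 (H.getD hi [])] ++ [pvP p])]
      simp
    · rw [ih (i + 1) hi (res ++ [pvP p]), ih (i + 1) hi ([] ++ [pvP p])]
      simp

-- a stretch of paragraphs on which the modular test never fires is emitted plain
lemma pvLoopA2_seg (H : List (List (String × String))) (step : Nat) :
    ∀ (chunk rest : List String) (i hi : Nat) (res : List String),
    (∀ j, i ≤ j → j < i + chunk.length → ¬(0 < j ∧ j % step = 0 ∧ hi < H.length)) →
    pvLoopA2 H step (chunk ++ rest) i hi res =
      pvLoopA2 H step rest (i + chunk.length) hi (res ++ chunk.map pvP) := by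
  intro chunk
  induction chunk with
  | nil => intro rest i hi res _; simp
  | cons c cs ih =>
    intro rest i hi res hno
    rw [List.cons_append, pvLoopA2]
    rw [if_neg (hno i le_rfl (by simp))]
    rw [ih rest (i + 1) hi (res ++ [pvP c])
      (fun j h1 h2 => hno j (by omega) (by simp at h2 ⊢; omega))]
    have h1 : i + 1 + cs.length = i + (c :: cs).length := by simp; omega
    rw [h1, List.append_assoc, List.singleton_append, List.map_cons]

lemma pvLoopB1_eq (H : List (List (String × String))) (n : Nat) (hnm : n < H.length) :
    ∀ (ps : List String) (i : Nat), i + ps.length = n → 1 ≤ i →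
    pvLoopA1 H H.length 1 ps i [] = pvLoopB1 (H.drop i) ps := by
  intro ps
  induction ps with
  | nil => intro i _ _; cases H.drop i <;> simp [pvLoopA1, pvLoopB1]
  | cons p ps ih =>
    intro i hlen hi
    have hiH : i < H.length := by simp at hlen; omega
    rw [pvLoopA1]
    split_ifs with hc
    · rw [pvLoopA1_acc H H.length 1 ps (i + 1)]
      rw [ih (i + 1) (by simp at hlen ⊢; omega) (by omega)]
      rw [List.drop_eq_getElem_cons hiH, pvLoopB1]
      simp [Nat.div_one, List.getElem?_eq_getElem hiH]
    · exact absurd ⟨by simpa [Nat.div_one] using hiH, Nat.mod_one i, hi⟩ hc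

lemma pvLoopB2_eq (H : List (List (String × String))) (paragraphs : List String)
    (step : Nat) (hstep : 0 < step) :
    ∀ (hs : List (List (String × String))) (k : Nat), H.drop k = hs → k < H.length →
    pvLoopA2 H step (paragraphs.drop ((k + 1) * step)) ((k + 1) * step) k [] =
      pvLoopB2 paragraphs paragraphs.length step H.length hs k := by
  intro hs
  induction hs with
  | nil =>
    intro k hdrop hk
    rw [List.drop_eq_nil_iff] at hdrop
    omega
  | cons h hs ih =>
    intro k hdrop hk
    rw [List.drop_eq_getElem_cons hk] at hdrop
    injection hdrop with hh hdrop'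
    rw [pvLoopB2]
    by_cases hn : paragraphs.length ≤ (k + 1) * step
    · rw [if_pos hn, List.drop_eq_nil_of_le hn, pvLoopA2]
    · rw [if_neg hn]
      replace hn := Nat.lt_of_not_le hn
      rw [List.drop_eq_getElem_cons hn, pvLoopA2]
      rw [if_pos ⟨Nat.mul_pos (Nat.succ_pos k) hstep, Nat.mul_mod_left (k + 1) step, hk⟩]
      rw [pvLoopA2_acc]
      have hgetd : H.getD k [] = h := by
        rw [List.getD_eq_getElem?_getD, List.getElem?_eq_getElem hk, hh]
        rfl
      have hks2 : (k + 2) * step = (k + 1) * step + step := by ring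
      have hks1 : (k + 1 + 1) * step = (k + 1) * step + step := by ring
      by_cases hkm : k + 1 < H.length
      · simp only [if_pos hkm]
        -- slice is the paragraph, then a no-insert chunk of step-1 paragraphs
        have hsplit : paragraphs.drop ((k + 1) * step + 1) =
            (paragraphs.drop ((k + 1) * step + 1)).take (step - 1) ++
              paragraphs.drop ((k + 1) * step + step) := by
          conv_lhs => rw [← List.take_append_drop (step - 1) (paragraphs.drop ((k + 1) * step + 1))]
          rw [List.drop_drop]
          congr 2
          omega
        rw [hsplit, pvLoopA2_seg]
        · have hslice : PySem.List.slice paragraphs (some (((k + 1) * step : Nat) : Int))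
              (some (((k + 2) * step : Nat) : Int)) =
              paragraphs[(k + 1) * step] :: (paragraphs.drop ((k + 1) * step + 1)).take (step - 1) := by
            rw [PySem.List.slice_natCast]
            have h2 : (k + 2) * step - (k + 1) * step = step := by omega
            have htake : ∀ (x : String) (l : List String),
                List.take step (x :: l) = x :: List.take (step - 1) l := by
              intro x l
              obtain ⟨s, rfl⟩ : ∃ s, step = s + 1 := ⟨step - 1, by omega⟩
              rw [List.take_succ_cons]
              simp
            rw [h2, List.drop_eq_getElem_cons hn, htake]
          rw [hslice]
          have htail : pvLoopA2 H step (paragraphs.drop ((k + 1) * step + step))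
              ((k + 1) * step + 1 + ((paragraphs.drop ((k + 1) * step + 1)).take (step - 1)).length)
              (k + 1) [] = pvLoopB2 paragraphs paragraphs.length step H.length hs (k + 1) := by
            by_cases hle : (k + 2) * step ≤ paragraphs.length
            · have hchlen : ((paragraphs.drop ((k + 1) * step + 1)).take (step - 1)).length = step - 1 := by
                simp [List.length_take, List.length_drop]
                omega
              rw [hchlen]
              have hidx : (k + 1) * step + 1 + (step - 1) = (k + 1 + 1) * step := by omega
              rw [hidx]
              have harg : (k + 1) * step + step = (k + 1 + 1) * step := by ring
              rw [harg]
              exact ih (k + 1) hdrop' hkm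
            · have h1 : paragraphs.drop ((k + 1) * step + step) = [] :=
                List.drop_eq_nil_of_le (by omega)
              have h2 : paragraphs.drop ((k + 1 + 1) * step) = [] :=
                List.drop_eq_nil_of_le (by omega)
              rw [h1, pvLoopA2, ← ih (k + 1) hdrop' hkm, h2, pvLoopA2]
          rw [pvLoopA2_acc H step (paragraphs.drop ((k + 1) * step + step)) _ (k + 1)
            ([] ++ List.map pvP ((paragraphs.drop ((k + 1) * step + 1)).take (step - 1)))]
          rw [htail, hgetd]
          simp [pvWrap]
        · intro j hj1 hj2 hbad
          obtain ⟨hj0, hmod, -⟩ := hbad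
          have hdvd : step ∣ j := Nat.dvd_of_mod_eq_zero hmod
          have hlt : j < (k + 1) * step + step := by
            have := List.length_take_le (step - 1) (paragraphs.drop ((k + 1) * step + 1))
            omega
          obtain ⟨q, rfl⟩ := hdvd
          have hq1 : k + 1 < q := by
            by_contra hq
            replace hq := Nat.le_of_not_lt hq
            have : step * q ≤ (k + 1) * step := by
              calc step * q ≤ step * (k + 1) := Nat.mul_le_mul_left step hq
                _ = (k + 1) * step := Nat.mul_comm _ _
            omega
          have : (k + 2) * step ≤ step * q := by
            calc (k + 2) * step = step * (k + 2) := Nat.mul_comm _ _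
              _ ≤ step * q := Nat.mul_le_mul_left step (by omega)
          omega
      · simp only [if_neg hkm]
        have hhs : hs = [] := by
          rw [← hdrop', List.drop_eq_nil_iff]
          omega
        rw [hhs, pvLoopB2]
        have hsplit : paragraphs.drop ((k + 1) * step + 1) =
            paragraphs.drop ((k + 1) * step + 1) ++ [] := by simp
        conv_lhs => rw [hsplit]
        rw [pvLoopA2_seg]
        · rw [pvLoopA2]
          have hslice : PySem.List.slice paragraphs (some (((k + 1) * step : Nat) : Int))
              (some ((paragraphs.length : Nat) : Int)) =
              paragraphs[(k + 1) * step] :: paragraphs.drop ((k + 1) * step + 1) := by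
            rw [PySem.List.slice_natCast, List.drop_eq_getElem_cons hn]
            rw [List.take_of_length_le (by simp)]
          rw [hslice, hgetd]
          simp [pvWrap]
          rw [List.drop_eq_getElem_cons
            (show (k + 1) * step < (List.map pvP paragraphs).length by simpa using hn)]
          simp
        · intro j _ _ hbad
          omega

-- ===== VERDICT (by name: the statement is the Claim_ definition above) =====
theorem add_jump_links_py_spec : Claim_equal_add_jump_links_py := by
  intro content headings _hdom hpre
  simp only [Spec_add_jump_links_py, add_jump_links_py, add_jump_links_py_alt]
  obtain ⟨hne, -⟩ := hpre
  have hm : 0 < headings.length := List.length_pos_iff.mpr hne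
  by_cases h : (pvParas content).length < headings.length
  · rw [if_pos h, if_pos h]
    have hmax : max 1 ((pvParas content).length / headings.length) = 1 := by
      simp [Nat.div_eq_of_lt h]
    rw [hmax]
    refine congrArg (PySem.Str.join "\n\n") ?_
    rw [PySem.List.slice_from_one, PySem.List.slice_from_one]
    cases hP : pvParas content with
    | nil =>
      rw [pvLoopA1]
      cases headings.tail <;> simp [pvLoopB1, pvWrap, PySem.List.slice]
    | cons p ps =>
      rw [hP] at h
      rw [pvLoopA1]
      split_ifs with hc
      · omega
      · rw [pvLoopA1_acc]
        rw [pvLoopB1_eq headings (p :: ps).length h ps 1 (by simp [Nat.add_comm]) le_rfl]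
        have hsl : PySem.List.slice (p :: ps) none (some 1) = [p] := by
          have := PySem.List.slice_to_natCast (p :: ps) 1
          simpa using this
        rw [hsl, List.drop_one]
        simp [pvWrap, List.tail]
  · rw [if_neg h, if_neg h]
    have hstep : 0 < (pvParas content).length / headings.length :=
      Nat.div_pos (Nat.le_of_not_lt h) hm
    refine congrArg (PySem.Str.join "\n\n") ?_
    set st := (pvParas content).length / headings.length with hst
    have hsn : st ≤ (pvParas content).length := Nat.div_le_self _ _
    conv_lhs =>
      rw [show pvParas content = (pvParas content).take st ++ (pvParas content).drop st from
        (List.take_append_drop _ _).symm]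
    rw [pvLoopA2_seg]
    · rw [pvLoopA2_acc]
      have hlen : ((pvParas content).take st).length = st := by
        simp [List.length_take]
        omega
      rw [hlen]
      have h01 : (0 : Nat) + st = (0 + 1) * st := by ring
      rw [h01]
      conv_lhs =>
        rw [show (pvParas content).drop st = (pvParas content).drop ((0 + 1) * st) by
          congr 1; omega]
      rw [pvLoopB2_eq headings (pvParas content) st hstep headings 0 List.drop_zero hm]
      rw [PySem.List.slice_to_natCast]
      simp [pvWrap]
    · intro j hj1 hj2 hbad
      obtain ⟨hj0, hmod, -⟩ := hbad
      have hjlt : j < st := by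
        have := List.length_take_le st (pvParas content)
        omega
      rw [Nat.mod_eq_of_lt hjlt] at hmod
      omega
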